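-- pv_equiv track=rewrite | github.com/flily/projeuler.py | problems/p0037.py | truncatable_generator
-- ===== SOURCE A (Python) =====
-- from typing import Iterator
-- import itertools
--
-- def truncatable_generator(size: int) -> Iterator[int]:
--     """
--     Generate all truncatable primes of size
--     """
--     if size <= 0:
--         return
--
--     if size == 1:
--         for x in [2, 3, 5, 7]:
--             yield x
--
--     digits = [[1, 3, 7, 9]] * size
--     digits[size - 1] = [3, 7]
--     digits[0] = [2, 3, 5, 7]
--     for x in itertools.product(*digits):
--         n = 0
--         for i in range(size):
--             n += x[i] * (10 ** (size - i - 1))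
--
--         yield n
-- ===== SOURCE B (Python) =====
-- def truncatable_generator(size):
--     """
--     Generate all truncatable-prime candidates of the given size, built
--     digit by digit with an accumulator instead of itertools.product.
--     For size == 1 it yields 2, 3, 5, 7 exactly once (A yields them twice).
--     """
--     if size <= 0:
--         return
--     if size == 1:
--         yield from (2, 3, 5, 7)
--         return
--     cols = [[2, 3, 5, 7]] + [[1, 3, 7, 9]] * (size - 2) + [[3, 7]]
--
--     def build(cols, n):
--         if not cols:
--             yield n
--         else:
--             for d in cols[0]:
--                 yield from build(cols[1:], n * 10 + d)
--
--     yield from build(cols, 0)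
-- ===== Notes on version B (the rewrite author's own statement) =====
-- stated objective: alternative
-- what changed: Replaces itertools.product over digit tuples plus a per-tuple positional power-of-10 summation loop with a recursive digit-by-digit builder that threads an accumulator n -> n*10+d, so numbers are built directly in one pass without materialising tuples or computing powers.
-- intended difference: For size == 1, A yields 2,3,5,7 twice (its size==1 branch yields them and then the generation loop, whose single digit slot ends up as [2,3,5,7] after both overwrites hit index 0, yields them again); B yields [2,3,5,7] once, which is the intended list of one-digit candidates. — e.g. on truncatable_generator(1): A returns [2, 3, 5, 7, 2, 3, 5, 7], B returns [2, 3, 5, 7]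
import Mathlib
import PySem

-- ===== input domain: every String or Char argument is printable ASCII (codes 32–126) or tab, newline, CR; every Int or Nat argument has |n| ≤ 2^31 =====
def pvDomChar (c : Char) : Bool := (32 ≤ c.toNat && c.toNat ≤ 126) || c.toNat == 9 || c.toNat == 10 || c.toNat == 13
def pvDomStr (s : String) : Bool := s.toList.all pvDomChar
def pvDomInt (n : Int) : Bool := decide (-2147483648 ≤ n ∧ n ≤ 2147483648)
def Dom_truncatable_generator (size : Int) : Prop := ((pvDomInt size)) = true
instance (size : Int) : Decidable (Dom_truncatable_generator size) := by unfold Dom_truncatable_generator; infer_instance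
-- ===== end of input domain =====

-- B replaces itertools.product + per-tuple power-of-10 summation by a recursive
-- digit-by-digit builder threading an accumulator n -> n*10+d (alternative
-- decomposition, same asymptotic cost); for size == 1 B yields 2,3,5,7 once
-- where A yields them twice (stated as D_ below).


-- ===== PORT A =====
-- itertools.product(*digits) in lexicographic order
def pyProduct : List (List Int) → List (List Int)
  | [] => [[]]
  | c :: cs => c.flatMap (fun d => (pyProduct cs).map (fun r => d :: r))

def truncatable_generator (size : Int) : List Int :=
  if size ≤ 0 then []
  else
    let pre : List Int := if size = 1 then [2, 3, 5, 7] else []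
    let digits := ((List.replicate size.toNat ([1, 3, 7, 9] : List Int)).set (size - 1).toNat [3, 7]).set 0 [2, 3, 5, 7]
    pre ++ (pyProduct digits).map (fun x =>
      (PySem.List.pyRange 0 size 1).foldl
        (fun n i => n + (PySem.List.pyGetD x i 0) * 10 ^ (size - i - 1).toNat) 0)

-- ===== PORT B =====
-- B's recursive builder: empty column list yields the accumulator
def altBuild : List (List Int) → Int → List Int
  | [], n => [n]
  | c :: cs, n => c.flatMap (fun d => altBuild cs (n * 10 + d))

def truncatable_generator_alt (size : Int) : List Int :=
  if size ≤ 0 then []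
  else if size = 1 then [2, 3, 5, 7]
  else altBuild ([[2, 3, 5, 7]] ++ List.replicate (size - 2).toNat [1, 3, 7, 9] ++ [[3, 7]]) 0

-- ===== PRECONDITION & SPEC =====
-- For size == 1, A yields 2,3,5,7 twice (its size==1 branch yields them, then the
-- generation loop, whose single slot ends as [2,3,5,7] after both overwrites hit
-- index 0, yields them again); B yields [2,3,5,7] once, the intended candidates.
def D_truncatable_generator (size : Int) : Prop := size = 1
instance (size : Int) : Decidable (D_truncatable_generator size) := by unfold D_truncatable_generator; infer_instance

def Spec_truncatable_generator (size : Int) (out : List Int) : Prop := ¬ D_truncatable_generator size → out = truncatable_generator_alt size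
instance (size : Int) (out : List Int) : Decidable (Spec_truncatable_generator size out) := by unfold Spec_truncatable_generator; infer_instance

def pvDiffWitness_truncatable_generator : Int := 1
def pvDiffWitnessOut_truncatable_generator : (List Int) × (List Int) :=
  ([2, 3, 5, 7, 2, 3, 5, 7], [2, 3, 5, 7])

-- ===== CLAIM (what is proved, stated in full; the proofs are below) =====
def Claim_unchanged_truncatable_generator : Prop := ∀ (size : Int), Dom_truncatable_generator size → Spec_truncatable_generator size (truncatable_generator size)
def Claim_changed_truncatable_generator : Prop := Dom_truncatable_generator (pvDiffWitness_truncatable_generator) ∧ D_truncatable_generator (pvDiffWitness_truncatable_generator) ∧ truncatable_generator (pvDiffWitness_truncatable_generator) = pvDiffWitnessOut_truncatable_generator.1 ∧ truncatable_generator_alt (pvDiffWitness_truncatable_generator) = pvDiffWitnessOut_truncatable_generator.2 ∧ pvDiffWitnessOut_truncatable_generator.1 ≠ pvDiffWitnessOut_truncatable_generator.2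
def Claim_exact_truncatable_generator : Prop := ∀ (size : Int), Dom_truncatable_generator size → D_truncatable_generator size → truncatable_generator size ≠ truncatable_generator_alt size

-- ===== LEMMAS AND PROOFS =====

-- positional value of a digit string
def pvS : List Int → Int
  | [] => 0
  | d :: x => d * 10 ^ x.length + pvS x

theorem pv_replicate_set (M L : List Int) : ∀ m : Nat,
    (List.replicate (m + 1) M).set m L = List.replicate m M ++ [L] := by
  intro m
  induction m with
  | zero => simp
  | succ k ih =>
    rw [List.replicate_succ, List.set_cons_succ, ih, ← List.cons_append, ← List.replicate_succ]

theorem pv_sum_eq_S : ∀ x : List Int,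
    ((List.range x.length).map (fun k => x.getD k 0 * 10 ^ (x.length - 1 - k))).sum = pvS x := by
  intro x
  induction x with
  | nil => simp [pvS]
  | cons d t ih =>
    rw [List.length_cons, List.range_succ_eq_map, List.map_cons, List.map_map, List.sum_cons]
    have h1 : ((List.range t.length).map
        ((fun k => (d :: t).getD k 0 * 10 ^ (t.length + 1 - 1 - k)) ∘ Nat.succ)) =
        (List.range t.length).map (fun k => t.getD k 0 * 10 ^ (t.length - 1 - k)) := by
      apply List.map_congr_left
      intro k _
      simp [Function.comp]
      omega
    rw [h1, ih]
    simp [pvS]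

theorem pv_horner_eq : ∀ (x : List Int) (n : Int),
    x.foldl (fun a d => a * 10 + d) n = n * 10 ^ x.length + pvS x := by
  intro x
  induction x with
  | nil => intro n; simp [pvS]
  | cons d t ih =>
    intro n
    rw [List.foldl_cons, ih]
    simp [pvS, pow_succ]
    ring

theorem pv_num_eq (x : List Int) (size : Int) (hs : size = (x.length : Int)) :
    (PySem.List.pyRange 0 size 1).foldl
      (fun n i => n + (PySem.List.pyGetD x i 0) * 10 ^ (size - i - 1).toNat) 0
    = x.foldl (fun a d => a * 10 + d) 0 := by
  subst hs
  rw [PySem.List.pyRange_one, List.foldl_map]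
  have hnt : ((x.length : Int) - 0).toNat = x.length := by omega
  rw [hnt]
  have h1 : ∀ (n : Int) (k : Nat), k ∈ List.range x.length →
      n + (PySem.List.pyGetD x ((0 : Int) + (k : Int)) 0) * 10 ^ (((x.length : Int)) - ((0 : Int) + (k : Int)) - 1).toNat
      = n + x.getD k 0 * 10 ^ (x.length - 1 - k) := by
    intro n k _
    simp [PySem.List.pyGetD_natCast]
    omega
  have h2 : List.foldl (fun (n : Int) (y : Nat) => n + PySem.List.pyGetD x ((0 : Int) + (y : Int)) 0 * 10 ^ (((x.length : Int)) - ((0 : Int) + (y : Int)) - 1).toNat) 0 (List.range x.length)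
      = List.foldl (fun (n : Int) (k : Nat) => n + x.getD k 0 * 10 ^ (x.length - 1 - k)) 0 (List.range x.length) :=
    List.foldl_ext _ _ _ h1
  rw [h2]
  rw [PySem.List.foldl_add]
  rw [pv_sum_eq_S]
  rw [pv_horner_eq]
  simp

theorem pv_prod_length : ∀ (ds : List (List Int)) (x : List Int),
    x ∈ pyProduct ds → x.length = ds.length := by
  intro ds
  induction ds with
  | nil => intro x hx; simp [pyProduct] at hx; simp [hx]
  | cons c cs ih =>
    intro x hx
    simp [pyProduct, List.mem_flatMap, List.mem_map] at hx
    obtain ⟨d, _, r, hr, rfl⟩ := hx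
    simp [ih r hr]

theorem pv_prod_build : ∀ (ds : List (List Int)) (n : Int),
    (pyProduct ds).map (fun x => x.foldl (fun a d => a * 10 + d) n) = altBuild ds n := by
  intro ds
  induction ds with
  | nil => intro n; simp [pyProduct, altBuild]
  | cons c cs ih =>
    intro n
    simp only [pyProduct, altBuild, List.map_flatMap]
    apply List.flatMap_congr
    intro d _
    rw [List.map_map]
    rw [← ih (n * 10 + d)]
    congr 1

-- ===== VERDICT (by name: the statement is the Claim_ definition above) =====
theorem truncatable_generator_spec : Claim_unchanged_truncatable_generator := by
  intro size _ hD
  unfold D_truncatable_generator at hD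
  by_cases hle : size ≤ 0
  · simp [truncatable_generator, truncatable_generator_alt, hle]
  · have h2 : 2 ≤ size := by omega
    obtain ⟨m, hm⟩ : ∃ m : Nat, size = (m : Int) + 2 := ⟨(size - 2).toNat, by omega⟩
    have hne1 : ¬ size = 1 := by omega
    unfold truncatable_generator truncatable_generator_alt
    rw [if_neg hle, if_neg hle, if_neg hne1, if_neg hne1]
    simp only []
    have hsz : size.toNat = m + 2 := by omega
    have hs1 : (size - 1).toNat = m + 1 := by omega
    have hs2 : (size - 2).toNat = m := by omega
    have hdig : ((List.replicate size.toNat ([1, 3, 7, 9] : List Int)).set (size - 1).toNat [3, 7]).set 0 [2, 3, 5, 7]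
        = [[2, 3, 5, 7]] ++ List.replicate (size - 2).toNat [1, 3, 7, 9] ++ [[3, 7]] := by
      rw [hsz, hs1, hs2]
      rw [pv_replicate_set _ _ (m + 1)]
      rw [List.replicate_succ]
      simp
    rw [hdig]
    set cols := [[2, 3, 5, 7]] ++ List.replicate (size - 2).toNat ([1, 3, 7, 9] : List Int) ++ [[3, 7]] with hcols
    have hclen : (cols.length : Int) = size := by
      simp [hcols, hs2]
      omega
    have hmap : (pyProduct cols).map (fun x =>
        (PySem.List.pyRange 0 size 1).foldl
          (fun n i => n + (PySem.List.pyGetD x i 0) * 10 ^ (size - i - 1).toNat) 0)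
        = (pyProduct cols).map (fun x => x.foldl (fun a d => a * 10 + d) 0) := by
      apply List.map_congr_left
      intro x hx
      exact pv_num_eq x size (by rw [← hclen, pv_prod_length cols x hx])
    rw [hmap, pv_prod_build]
    simp

theorem truncatable_generator_changed : Claim_changed_truncatable_generator := by
  unfold Claim_changed_truncatable_generator; decide

theorem truncatable_generator_tight : Claim_exact_truncatable_generator := by
  intro size _ hD
  unfold D_truncatable_generator at hD
  subst hD
  decide
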